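-- pv_equiv track=rewrite | github.com/21david/Interview-Kickstart | Week 5 - Dynamic Programming/Color The Fence.py | number_of_ways
-- ===== SOURCE A (Python) =====
-- mod = int(1e9+7)
--
-- def number_of_ways(n, k):
--     if n == 1: return k
--
--     c1, c2 = k, k - 1
--
--     for _ in range(n - 2):
--         c1 = c1 * (k-1) + c2
--         c2 = c1 - c2
--         c1 %= mod
--         c2 %= mod
--
--     return (c1 * k) % mod
-- ===== SOURCE B (Python) =====
-- mod = int(1e9+7)
--
-- def _mat_mul(A, B):
--     (a, b, c, d), (e, f, g, h) = A, B
--     return ((a*e + b*g) % mod, (a*f + b*h) % mod,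
--             (c*e + d*g) % mod, (c*f + d*h) % mod)
--
-- def _mat_pow(M, e):
--     R = (1, 0, 0, 1)
--     while e > 0:
--         if e & 1:
--             R = _mat_mul(R, M)
--         M = _mat_mul(M, M)
--         e >>= 1
--     return R
--
-- def number_of_ways(n, k):
--     if n == 1:
--         return k
--     e = n - 2 if n > 2 else 0
--     a, b, _, _ = _mat_pow(((k-1) % mod, 1, (k-1) % mod, 0), e)
--     c1 = (a * (k % mod) + b * ((k-1) % mod)) % mod
--     return (c1 * k) % mod
-- ===== Notes on version B (the rewrite author's own statement) =====
-- stated objective: faster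
-- what changed: Replaced A's O(n) iteration of the linear recurrence c1,c2 by binary (square-and-multiply) exponentiation of the 2x2 transition matrix mod 1e9+7, combining the result with the initial vector (k, k-1).
import Mathlib
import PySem

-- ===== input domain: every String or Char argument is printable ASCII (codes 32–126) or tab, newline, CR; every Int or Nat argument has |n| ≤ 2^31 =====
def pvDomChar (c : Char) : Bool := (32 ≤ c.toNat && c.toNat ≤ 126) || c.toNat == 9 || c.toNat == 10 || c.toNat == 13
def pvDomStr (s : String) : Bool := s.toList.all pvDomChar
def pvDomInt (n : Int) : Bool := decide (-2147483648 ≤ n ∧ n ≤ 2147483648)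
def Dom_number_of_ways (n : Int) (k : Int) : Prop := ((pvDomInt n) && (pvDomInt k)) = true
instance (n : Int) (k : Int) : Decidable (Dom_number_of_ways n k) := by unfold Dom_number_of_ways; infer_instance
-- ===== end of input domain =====

-- B replaces A's O(n) linear-recurrence loop by O(log n) binary matrix exponentiation of the same 2x2 recurrence.

-- module-level constant `mod = int(1e9+7)`
def pvMod : Int := 1000000007

-- ===== PORT A =====
-- one iteration of A's for-loop body (Python `%` with a positive modulus = Lean `%` on Int)
def pvStepA (k : Int) (s : Int × Int) : Int × Int :=
  let c1 := s.1 * (k - 1) + s.2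
  let c2 := c1 - s.2
  (c1 % pvMod, c2 % pvMod)

def number_of_ways (n : Int) (k : Int) : Int :=
  if n == 1 then k
  else
    let st := (PySem.List.pyRange 0 (n - 2) 1).foldl (fun s _ => pvStepA k s) (k, k - 1)
    (st.1 * k) % pvMod

-- ===== PORT B =====
-- 2x2 matrix as a flat 4-tuple (a, b, c, d); multiplication reduced mod pvMod (Source B `_mat_mul`)
def pvMatMul (A B : Int × Int × Int × Int) : Int × Int × Int × Int :=
  ((A.1 * B.1 + A.2.1 * B.2.2.1) % pvMod, (A.1 * B.2.1 + A.2.1 * B.2.2.2) % pvMod,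
   (A.2.2.1 * B.1 + A.2.2.2 * B.2.2.1) % pvMod, (A.2.2.1 * B.2.1 + A.2.2.2 * B.2.2.2) % pvMod)

-- Source B `_mat_pow`'s while-loop (exponent is a count, hence Nat)
def pvMatPowLoop (R M : Int × Int × Int × Int) (e : Nat) : Int × Int × Int × Int :=
  if e = 0 then R
  else pvMatPowLoop (if e % 2 = 1 then pvMatMul R M else R) (pvMatMul M M) (e / 2)
termination_by e
decreasing_by omega

def number_of_ways_alt (n : Int) (k : Int) : Int :=
  if n == 1 then k
  else
    let e : Nat := (if n > 2 then n - 2 else 0).toNat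
    let P := pvMatPowLoop (1, 0, 0, 1) ((k - 1) % pvMod, 1, (k - 1) % pvMod, 0) e
    let c1 := (P.1 * (k % pvMod) + P.2.1 * ((k - 1) % pvMod)) % pvMod
    (c1 * k) % pvMod

-- ===== PRECONDITION & SPEC =====
def Spec_number_of_ways (n : Int) (k : Int) (out : Int) : Prop := out = number_of_ways_alt n k
instance (n : Int) (k : Int) (out : Int) : Decidable (Spec_number_of_ways n k out) := by unfold Spec_number_of_ways; infer_instance

-- ===== CLAIM (what is proved, stated in full; the proofs are below) =====
def Claim_equal_number_of_ways : Prop := ∀ (n : Int) (k : Int), Dom_number_of_ways n k → Spec_number_of_ways n k (number_of_ways n k)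

-- ===== LEMMAS AND PROOFS =====

-- exact (unreduced) 2x2 integer matrix multiplication and naive power
def mul0 (A B : Int × Int × Int × Int) : Int × Int × Int × Int :=
  (A.1 * B.1 + A.2.1 * B.2.2.1, A.1 * B.2.1 + A.2.1 * B.2.2.2,
   A.2.2.1 * B.1 + A.2.2.2 * B.2.2.1, A.2.2.1 * B.2.1 + A.2.2.2 * B.2.2.2)

def pow0 (M : Int × Int × Int × Int) : Nat → Int × Int × Int × Int
  | 0 => (1, 0, 0, 1)
  | j + 1 => mul0 (pow0 M j) M

-- entrywise congruence mod pvMod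
def MC (A B : Int × Int × Int × Int) : Prop :=
  A.1 % pvMod = B.1 % pvMod ∧ A.2.1 % pvMod = B.2.1 % pvMod ∧
  A.2.2.1 % pvMod = B.2.2.1 % pvMod ∧ A.2.2.2 % pvMod = B.2.2.2 % pvMod

theorem mul0_assoc (A B C : Int × Int × Int × Int) : mul0 (mul0 A B) C = mul0 A (mul0 B C) := by
  simp [mul0]; refine ⟨by ring, by ring, by ring, by ring⟩

theorem one_mul0 (A : Int × Int × Int × Int) : mul0 (1, 0, 0, 1) A = A := by
  simp [mul0]

theorem mul0_one (A : Int × Int × Int × Int) : mul0 A (1, 0, 0, 1) = A := by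
  simp [mul0]

theorem pow0_succ' (M : Int × Int × Int × Int) (j : Nat) :
    pow0 M (j + 1) = mul0 M (pow0 M j) := by
  induction j with
  | zero => simp [pow0, one_mul0, mul0_one]
  | succ j ih =>
    show mul0 (pow0 M (j + 1)) M = mul0 M (mul0 (pow0 M j) M)
    rw [ih, mul0_assoc]

theorem pow0_add (M : Int × Int × Int × Int) (a b : Nat) :
    pow0 M (a + b) = mul0 (pow0 M a) (pow0 M b) := by
  induction b with
  | zero => simp [pow0, mul0_one]
  | succ b ih => rw [← Nat.add_assoc, pow0, ih, pow0, mul0_assoc]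

theorem pow0_sq (M : Int × Int × Int × Int) (j : Nat) :
    pow0 (mul0 M M) j = pow0 M (2 * j) := by
  induction j with
  | zero => rfl
  | succ j ih =>
    have h2 : pow0 M 2 = mul0 M M := by
      show mul0 (mul0 (1, 0, 0, 1) M) M = mul0 M M
      rw [one_mul0]
    rw [show pow0 (mul0 M M) (j + 1) = mul0 (pow0 (mul0 M M) j) (mul0 M M) from rfl, ih,
      show 2 * (j + 1) = 2 * j + 2 from by ring, pow0_add, h2]

theorem MC_refl (A : Int × Int × Int × Int) : MC A A := ⟨rfl, rfl, rfl, rfl⟩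

theorem modeq_of_eq_mod {a b : Int} (h : a % pvMod = b % pvMod) : Int.ModEq pvMod a b := h

theorem MC_mul {A A' B B' : Int × Int × Int × Int} (hA : MC A A') (hB : MC B B') :
    MC (pvMatMul A B) (mul0 A' B') := by
  obtain ⟨a1, a2, a3, a4⟩ := hA
  obtain ⟨b1, b2, b3, b4⟩ := hB
  refine ⟨?_, ?_, ?_, ?_⟩ <;>
    simp only [pvMatMul, mul0, Int.emod_emod_of_dvd _ dvd_rfl] <;>
    exact Int.ModEq.add (Int.ModEq.mul (modeq_of_eq_mod ‹_›) (modeq_of_eq_mod ‹_›))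
      (Int.ModEq.mul (modeq_of_eq_mod ‹_›) (modeq_of_eq_mod ‹_›))

theorem matPowLoop_spec (e : Nat) : ∀ R M R' M', MC R R' → MC M M' →
    MC (pvMatPowLoop R M e) (mul0 R' (pow0 M' e)) := by
  induction e using Nat.strong_induction_on with
  | _ e ih =>
    intro R M R' M' hR hM
    rw [pvMatPowLoop]
    by_cases h0 : e = 0
    · simp [h0, pow0, mul0_one, hR]
    · simp only [h0, if_false]
      have hlt : e / 2 < e := by omega
      have hR1 : MC (if e % 2 = 1 then pvMatMul R M else R)
          (if e % 2 = 1 then mul0 R' M' else R') := by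
        by_cases hp : e % 2 = 1 <;> simp [hp, MC_mul hR hM, hR]
      have := ih (e / 2) hlt _ _ _ _ hR1 (MC_mul hM hM)
      rw [pow0_sq] at this
      have key : mul0 (if e % 2 = 1 then mul0 R' M' else R') (pow0 M' (2 * (e / 2)))
          = mul0 R' (pow0 M' e) := by
        by_cases hp : e % 2 = 1
        · simp only [hp, if_true]
          rw [mul0_assoc]
          congr 1
          rw [show mul0 M' (pow0 M' (2 * (e / 2))) = pow0 M' (2 * (e / 2) + 1) from
            (pow0_succ' M' (2 * (e / 2))).symm]
          congr 1
          omega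
        · simp only [hp, if_false]
          congr 2
          omega
      rwa [key] at this

-- the transition matrix of A's loop, and matrix-vector application
def pvMk (k : Int) : Int × Int × Int × Int := (k - 1, 1, k - 1, 0)

def applyM (M : Int × Int × Int × Int) (v : Int × Int) : Int × Int :=
  (M.1 * v.1 + M.2.1 * v.2, M.2.2.1 * v.1 + M.2.2.2 * v.2)

theorem applyM_mul0 (A B : Int × Int × Int × Int) (v : Int × Int) :
    applyM (mul0 A B) v = applyM A (applyM B v) := by
  simp [applyM, mul0]; constructor <;> ring

def iterA (k : Int) : Nat → (Int × Int) → (Int × Int)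
  | 0, s => s
  | j + 1, s => iterA k j (pvStepA k s)

theorem foldl_const_iterA (k : Int) (l : List Int) : ∀ s,
    l.foldl (fun s _ => pvStepA k s) s = iterA k l.length s := by
  induction l with
  | nil => intro s; rfl
  | cons x xs ih => intro s; simpa [List.foldl, iterA] using ih (pvStepA k s)

-- A's loop state stays congruent mod pvMod to the exact matrix-power trajectory
theorem iterA_cong (k : Int) (j : Nat) : ∀ (s v : Int × Int),
    s.1 % pvMod = v.1 % pvMod → s.2 % pvMod = v.2 % pvMod →
    (iterA k j s).1 % pvMod = (applyM (pow0 (pvMk k) j) v).1 % pvMod ∧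
    (iterA k j s).2 % pvMod = (applyM (pow0 (pvMk k) j) v).2 % pvMod := by
  induction j with
  | zero =>
    intro s v h1 h2
    simpa [iterA, pow0, applyM] using ⟨h1, h2⟩
  | succ j ih =>
    intro s v h1 h2
    have hstep1 : (pvStepA k s).1 % pvMod = (applyM (pvMk k) v).1 % pvMod := by
      simp only [pvStepA, pvMk, applyM, Int.emod_emod_of_dvd _ dvd_rfl]
      have h : (s.1 * (k - 1) + s.2) % pvMod = (v.1 * (k - 1) + v.2) % pvMod :=
        Int.ModEq.add (Int.ModEq.mul_right _ (modeq_of_eq_mod h1)) (modeq_of_eq_mod h2)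
      calc (s.1 * (k - 1) + s.2) % pvMod = (v.1 * (k - 1) + v.2) % pvMod := h
        _ = _ := by congr 1; ring
    have hstep2 : (pvStepA k s).2 % pvMod = (applyM (pvMk k) v).2 % pvMod := by
      have e1 : (pvStepA k s).2 = (s.1 * (k - 1)) % pvMod := by
        simp only [pvStepA]
        congr 1
        ring
      have e2 : (applyM (pvMk k) v).2 = v.1 * (k - 1) := by
        simp only [pvMk, applyM]; ring
      rw [e1, e2, Int.emod_emod_of_dvd _ dvd_rfl]
      exact Int.ModEq.mul_right _ (modeq_of_eq_mod h1)
    have := ih (pvStepA k s) (applyM (pvMk k) v) hstep1 hstep2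
    rw [show pow0 (pvMk k) (j + 1) = mul0 (pow0 (pvMk k) j) (pvMk k) from rfl, applyM_mul0]
    simpa [iterA] using this

-- the reduced starting matrix of Source B is congruent to pvMk
theorem M0_cong (k : Int) : MC ((k - 1) % pvMod, 1, (k - 1) % pvMod, 0) (pvMk k) := by
  refine ⟨?_, rfl, ?_, rfl⟩ <;> exact Int.emod_emod_of_dvd _ dvd_rfl

-- ===== VERDICT (by name: the statement is the Claim_ definition above) =====
theorem number_of_ways_spec : Claim_equal_number_of_ways := by
  unfold Claim_equal_number_of_ways
  intro n k _
  unfold Spec_number_of_ways number_of_ways number_of_ways_alt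
  by_cases h1 : n = 1
  · simp [h1]
  · simp only [beq_iff_eq, h1, if_false]
    set e : Nat := (if n > 2 then n - 2 else 0).toNat with he
    have hlen : (PySem.List.pyRange 0 (n - 2) 1).length = e := by
      rw [PySem.List.length_pyRange_one]
      by_cases h2 : n > 2
      · simp [he, h2]
        try omega
      · simp [he, h2]
        try omega
    rw [foldl_const_iterA, hlen]
    -- A side ≡ exact trajectory
    have hA := iterA_cong k e (k, k - 1) (k, k - 1) rfl rfl
    -- B side ≡ exact trajectory
    have hB := matPowLoop_spec e (1, 0, 0, 1) ((k - 1) % pvMod, 1, (k - 1) % pvMod, 0)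
      (1, 0, 0, 1) (pvMk k) (MC_refl _) (M0_cong k)
    rw [one_mul0] at hB
    obtain ⟨p1, p2, _, _⟩ := hB
    set P := pvMatPowLoop (1, 0, 0, 1) ((k - 1) % pvMod, 1, (k - 1) % pvMod, 0) e
    have hc1 : (iterA k e (k, k - 1)).1 % pvMod
        = (P.1 * (k % pvMod) + P.2.1 * ((k - 1) % pvMod)) % pvMod := by
      rw [hA.1]
      have hx : (applyM (pow0 (pvMk k) e) (k, k - 1)).1
          = (pow0 (pvMk k) e).1 * k + (pow0 (pvMk k) e).2.1 * (k - 1) := by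
        simp [applyM]
      rw [hx]
      have h : (P.1 * (k % pvMod) + P.2.1 * ((k - 1) % pvMod)) % pvMod
          = ((pow0 (pvMk k) e).1 * k + (pow0 (pvMk k) e).2.1 * (k - 1)) % pvMod :=
        Int.ModEq.add
          (Int.ModEq.mul (modeq_of_eq_mod p1) (Int.emod_emod_of_dvd k dvd_rfl))
          (Int.ModEq.mul (modeq_of_eq_mod p2) (Int.emod_emod_of_dvd (k - 1) dvd_rfl))
      exact h.symm
    have hmod : (iterA k e (k, k - 1)).1 % pvMod
        = ((P.1 * (k % pvMod) + P.2.1 * ((k - 1) % pvMod)) % pvMod) % pvMod := by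
      rw [hc1, Int.emod_emod_of_dvd _ dvd_rfl]
    exact Int.ModEq.mul_right k hmod
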